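-- pv_equiv track=rewrite | github.com/WalterA/allrepo | ITSCloud-main/ProjectsVScode/Esercizi_obbligatori/Lezione8/Esercizi_lezione8.py | numeri_bellissimi
-- ===== SOURCE A (Python) =====
-- def numeri_bellissimi (nums:list[int],k:int):
--
--     lista = []
--
--     for i in range(len(nums)):
--         for j in range(i + 1 , len(nums)):
--             risultato = nums[i] - nums[j]
--             if risultato != 0:
--                 lista.append(abs(risultato))
--
--     if len(nums) == 1:
--         return nums[0]
--
--     for i in lista:
--         if i != k:
--             return abs(i)
-- ===== SOURCE B (Python) =====
-- def numeri_bellissimi(nums, k):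
--     if len(nums) == 1:
--         return nums[0]
--     for i, x in enumerate(nums):
--         for y in nums[i + 1:]:
--             d = abs(x - y)
--             if d != 0 and d != k:
--                 return d
--     return None
-- ===== Notes on version B (the rewrite author's own statement) =====
-- stated objective: simpler
-- what changed: B drops A's intermediate list of all nonzero pairwise differences and returns the first qualifying difference directly from a single early-exit pairwise scan.
import Mathlib
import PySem

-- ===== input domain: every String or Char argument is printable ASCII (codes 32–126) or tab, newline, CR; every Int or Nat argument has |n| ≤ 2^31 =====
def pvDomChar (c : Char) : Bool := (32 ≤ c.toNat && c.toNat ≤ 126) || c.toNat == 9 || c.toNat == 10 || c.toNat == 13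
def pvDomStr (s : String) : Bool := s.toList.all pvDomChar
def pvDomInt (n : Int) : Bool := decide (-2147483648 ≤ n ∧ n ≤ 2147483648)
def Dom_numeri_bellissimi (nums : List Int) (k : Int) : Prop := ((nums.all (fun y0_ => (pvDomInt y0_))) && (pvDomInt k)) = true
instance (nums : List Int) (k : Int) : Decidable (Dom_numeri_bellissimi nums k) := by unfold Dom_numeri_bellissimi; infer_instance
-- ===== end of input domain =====

-- B drops A's intermediate list of all nonzero pairwise differences and returns the
-- first qualifying difference directly from a single early-exit pairwise scan (simpler).


-- ===== PORT A =====
-- 'for i in lista: if i != k: return abs(i)' (falls through to None)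
def pvFirstNeq : List Int → Int → Option Int
  | [], _ => none
  | i :: t, k => if i ≠ k then some |i| else pvFirstNeq t k

def numeri_bellissimi (nums : List Int) (k : Int) : Option Int :=
  let n : Int := nums.length
  let lista : List Int :=
    (PySem.List.pyRange 0 n 1).foldl (fun acc i =>
      (PySem.List.pyRange (i + 1) n 1).foldl (fun acc j =>
        let risultato := PySem.List.pyGetD nums i 0 - PySem.List.pyGetD nums j 0
        if risultato ≠ 0 then acc ++ [|risultato|] else acc) acc) []
  if nums.length = 1 then some (PySem.List.pyGetD nums 0 0)
  else pvFirstNeq lista k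

-- ===== PORT B =====
-- inner 'for y in nums[i+1:]' with early return
def pvAltInner (k x : Int) : List Int → Option Int
  | [] => none
  | y :: ys =>
    let d := |x - y|
    if d ≠ 0 ∧ d ≠ k then some d else pvAltInner k x ys

-- outer 'for i, x in enumerate(nums)' over successive suffixes
def pvAltOuter (k : Int) : List Int → Option Int
  | [] => none
  | x :: xs =>
    match pvAltInner k x xs with
    | some d => some d
    | none => pvAltOuter k xs

def numeri_bellissimi_alt (nums : List Int) (k : Int) : Option Int :=
  match nums with
  | [x] => some x
  | _ => pvAltOuter k nums

-- ===== PRECONDITION & SPEC =====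
def Spec_numeri_bellissimi (nums : List Int) (k : Int) (out : Option Int) : Prop := out = numeri_bellissimi_alt nums k
instance (nums : List Int) (k : Int) (out : Option Int) : Decidable (Spec_numeri_bellissimi nums k out) := by unfold Spec_numeri_bellissimi; infer_instance

-- ===== CLAIM (what is proved, stated in full; the proofs are below) =====
def Claim_equal_numeri_bellissimi : Prop := ∀ (nums : List Int) (k : Int), Dom_numeri_bellissimi nums k → Spec_numeri_bellissimi nums k (numeri_bellissimi nums k)

-- ===== LEMMAS AND PROOFS =====

-- the nonzero abs-differences of x against each later element
def pvInnerL (x : Int) (ys : List Int) : List Int :=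
  (ys.filter (fun y => decide (x - y ≠ 0))).map (fun y => |x - y|)

-- all nonzero pairwise abs-differences, in A's (i, j) order
def pvPairs : List Int → List Int
  | [] => []
  | x :: xs => pvInnerL x xs ++ pvPairs xs

theorem pvFirstNeq_append (l1 l2 : List Int) (k : Int) :
    pvFirstNeq (l1 ++ l2) k =
      match pvFirstNeq l1 k with
      | some v => some v
      | none => pvFirstNeq l2 k := by
  induction l1 with
  | nil => simp [pvFirstNeq]
  | cons a t ih =>
    simp only [List.cons_append, pvFirstNeq]
    split_ifs <;> simp [ih]

theorem pvFirstNeq_innerL (k x : Int) (ys : List Int) :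
    pvFirstNeq (pvInnerL x ys) k = pvAltInner k x ys := by
  induction ys with
  | nil => rfl
  | cons y ys ih =>
    by_cases h0 : x - y = 0
    · have hd : |x - y| = 0 := by rw [h0]; simp
      simp [pvInnerL, pvAltInner, h0] at *
      simpa [pvInnerL] using ih
    · have hd : |x - y| ≠ 0 := by simpa [abs_eq_zero] using h0
      by_cases hk : |x - y| = k
      · simp [pvInnerL, pvAltInner, h0, hk, pvFirstNeq] at *
        simpa [pvInnerL] using ih
      · simp [pvInnerL, pvAltInner, h0, hd, hk, pvFirstNeq, abs_abs]

theorem pvFirstNeq_pairs (k : Int) (nums : List Int) :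
    pvFirstNeq (pvPairs nums) k = pvAltOuter k nums := by
  induction nums with
  | nil => rfl
  | cons x xs ih =>
    simp only [pvPairs, pvAltOuter, pvFirstNeq_append, pvFirstNeq_innerL, ih]

theorem pv_inner_fold (x : Int) (ys : List Int) (acc : List Int) :
    ys.foldl (fun acc y => if x - y ≠ 0 then acc ++ [|x - y|] else acc) acc
      = acc ++ pvInnerL x ys := by
  induction ys generalizing acc with
  | nil => simp [pvInnerL]
  | cons y ys ih =>
    by_cases h : x - y = 0 <;>
      simp [pvInnerL, h] at * <;> simp [ih]

theorem pv_outer_fold (nums : List Int) :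
    ∀ (tail : List Int) (a : Nat), nums.drop a = tail → ∀ (acc : List Int),
      (PySem.List.pyRange (a : Int) (nums.length : Int) 1).foldl (fun acc i =>
        (PySem.List.pyRange (i + 1) (nums.length : Int) 1).foldl (fun acc j =>
          let risultato := PySem.List.pyGetD nums i 0 - PySem.List.pyGetD nums j 0
          if risultato ≠ 0 then acc ++ [|risultato|] else acc) acc) acc
      = acc ++ pvPairs tail := by
  intro tail
  induction tail with
  | nil =>
    intro a hdrop acc
    have hlen : nums.length ≤ a := by
      by_contra h
      have := List.drop_eq_nil_iff.mp hdrop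
      omega
    rw [PySem.List.pyRange_one_eq_nil (by exact_mod_cast hlen)]
    simp [pvPairs]
  | cons x rest ih =>
    intro a hdrop acc
    have hlt : a < nums.length := by
      by_contra h
      rw [List.drop_eq_nil_iff.mpr (by omega)] at hdrop
      simp at hdrop
    have hx : PySem.List.pyGetD nums (a : Int) 0 = x := by
      have hget : nums[a]? = some x := by
        have := congrArg (fun l => List.head? l) hdrop
        simpa [List.head?_drop] using this
      rw [PySem.List.pyGetD_natCast]
      have : nums.getD a 0 = nums[a]'hlt := List.getD_eq_getElem nums 0 hlt
      rw [this]
      have h2 : nums[a]? = some (nums[a]'hlt) := List.getElem?_eq_getElem hlt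
      rw [hget] at h2
      exact (Option.some.inj h2).symm
    have hrest : nums.drop (a + 1) = rest := by
      have h2 : List.drop 1 (List.drop a nums) = rest := by rw [hdrop]; rfl
      rw [List.drop_drop] at h2
      exact h2
    rw [PySem.List.pyRange_one_cons (by exact_mod_cast hlt)]
    simp only [List.foldl_cons]
    have hstep :
        (PySem.List.pyRange ((a : Int) + 1) (nums.length : Int) 1).foldl (fun acc j =>
          let risultato := PySem.List.pyGetD nums (a : Int) 0 - PySem.List.pyGetD nums j 0
          if risultato ≠ 0 then acc ++ [|risultato|] else acc) acc
        = acc ++ pvInnerL x rest := by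
      have h1 := PySem.List.foldl_pyRange_pyGetD (xs := nums) (a := (a : Int) + 1)
        (d := 0)
        (f := fun acc y => if x - y ≠ 0 then acc ++ [|x - y|] else acc)
        (init := acc) (by omega)
      have ha : ((a : Int) + 1).toNat = a + 1 := by omega
      rw [ha, hrest, pv_inner_fold x rest acc] at h1
      simp only [hx]
      exact h1
    rw [hstep]
    have := ih (a + 1) hrest (acc ++ pvInnerL x rest)
    rw [show ((a : Int) + 1) = ((a + 1 : Nat) : Int) from by push_cast; ring]
    rw [this]
    simp [pvPairs]

theorem pvA_eq (nums : List Int) (k : Int) :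
    numeri_bellissimi nums k =
      if nums.length = 1 then some (PySem.List.pyGetD nums 0 0)
      else pvFirstNeq (pvPairs nums) k := by
  unfold numeri_bellissimi
  have h := pv_outer_fold nums nums 0 (by simp) []
  simp only [Nat.cast_zero] at h ⊢
  rw [show ((0 : Int)) = ((0 : Nat) : Int) from rfl] at h ⊢
  rw [h]
  simp

-- ===== VERDICT (by name: the statement is the Claim_ definition above) =====
theorem numeri_bellissimi_spec : Claim_equal_numeri_bellissimi := by
  intro nums k _
  unfold Spec_numeri_bellissimi
  rw [pvA_eq]
  match nums with
  | [] => rfl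
  | [x] => simp [numeri_bellissimi_alt, PySem.List.pyGetD_zero_cons]
  | x :: y :: rest =>
    simp only [List.length_cons, numeri_bellissimi_alt]
    rw [if_neg (by simp), pvFirstNeq_pairs]
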